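-- pv_equiv track=rewrite | github.com/nvidia-sonic/sonic-gnmi | testdata/generate_dash.py | generate_route
-- ===== SOURCE A (Python) =====
-- def ip2int(ip):
--     return sum(int(v) * 256 ** (3 - i) for i, v in enumerate(ip.split(".")))
--
-- def int2ip(number):
--     result = []
--     for i in range(4):
--         number, mod = divmod(number, 256)
--         result.insert(0, mod)
--     return ".".join(str(i) for i in result)
--
-- def generate_route(num):
--     ret = {}
--     ip = "10.0.50.1"
--     pos = ip2int(ip)
--     for i in range(num):
--         pos += 1
--         key = "F4939FEFC47E:" + int2ip(pos) + "/32"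
--         data = {"action_type":"vnet", "vnet":"Vnet%07d"%i}
--         ret[key] = data
--     return ret
-- ===== SOURCE B (Python) =====
-- def generate_route(num):
--     ret = {}
--     a, b, c, d = 10, 0, 50, 1
--     for i in range(num):
--         d += 1
--         if d == 256:
--             d = 0
--             c += 1
--             if c == 256:
--                 c = 0
--                 b += 1
--                 if b == 256:
--                     b = 0
--                     a += 1
--                     if a == 256:
--                         a = 0
--         key = "F4939FEFC47E:%d.%d.%d.%d/32" % (a, b, c, d)
--         ret[key] = {"action_type": "vnet", "vnet": "Vnet%07d" % i}
--     return ret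
-- ===== Notes on version B (the rewrite author's own statement) =====
-- stated objective: simpler
-- what changed: B keeps the four IP octets directly as loop state and propagates the increment's carry in place, dropping the ip2int/int2ip integer round-trip done every iteration.
import Mathlib
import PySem

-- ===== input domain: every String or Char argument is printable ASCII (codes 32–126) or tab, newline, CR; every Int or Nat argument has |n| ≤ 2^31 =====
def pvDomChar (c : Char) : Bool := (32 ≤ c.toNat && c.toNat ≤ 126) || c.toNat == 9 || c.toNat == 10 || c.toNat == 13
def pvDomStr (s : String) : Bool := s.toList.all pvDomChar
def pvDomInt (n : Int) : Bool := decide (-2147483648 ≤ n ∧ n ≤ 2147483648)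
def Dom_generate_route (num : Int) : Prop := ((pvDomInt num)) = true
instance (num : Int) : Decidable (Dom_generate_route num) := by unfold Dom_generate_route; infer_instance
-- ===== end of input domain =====

-- B keeps the four IP octets directly as loop state with in-place carry propagation,
-- dropping A's per-iteration ip2int/int2ip integer round-trip (objective: simpler).

-- ===== PORT A =====
-- int(v) and 256 ** (3 - i) are exact here: ip2int is only applied to "10.0.50.1",
-- whose dotted parts all parse and give exponents 3,2,1,0 ≥ 0.
def ip2int (ip : String) : Int :=
  (((PySem.List.enumerate ((PySem.Str.split? ip ".").getD []) 0)).map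
    (fun p => ((PySem.Int.ofStr? p.2).getD 0) * 256 ^ (3 - p.1).toNat)).sum

def int2ip (number : Int) : String :=
  let st := (PySem.List.pyRange 0 4 1).foldl
    (fun (s : Int × List Int) _ =>
      let dm := (PySem.Int.divmod? s.1 256).getD (0, 0)
      (dm.1, PySem.List.insert s.2 0 dm.2))
    (number, [])
  PySem.Str.join "." (st.2.map PySem.Int.toStr)

-- loop body of A; "Vnet%07d" % i ported as zfill (exact: i ≥ 0 in the loop)
def stepA (s : PySem.Dict String (List (String × String)) × Int) (i : Int) :
    PySem.Dict String (List (String × String)) × Int :=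
  let pos := s.2 + 1
  let key := "F4939FEFC47E:" ++ int2ip pos ++ "/32"
  let data : List (String × String) :=
    [("action_type", "vnet"), ("vnet", "Vnet" ++ PySem.Str.zfill (PySem.Int.toStr i) 7)]
  (s.1.insert key data, pos)

def generate_route (num : Int) : List (String × List (String × String)) :=
  let ip := "10.0.50.1"
  let pos := ip2int ip
  ((PySem.List.pyRange 0 num 1).foldl stepA (PySem.Dict.empty, pos)).1.items

-- ===== PORT B =====
-- loop body of B: carry-propagating octet increment, key built from the octets;
-- "%d" pieces ported as toStr, "Vnet%07d" % i as zfill (exact: i ≥ 0 in the loop)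
def stepB (s : PySem.Dict String (List (String × String)) × Int × Int × Int × Int) (i : Int) :
    PySem.Dict String (List (String × String)) × Int × Int × Int × Int :=
  let ret := s.1
  let a := s.2.1
  let b := s.2.2.1
  let c := s.2.2.2.1
  let d := s.2.2.2.2
  let d' := d + 1
  let o : Int × Int × Int × Int :=
    if d' = 256 then
      let c' := c + 1
      if c' = 256 then
        let b' := b + 1
        if b' = 256 then
          let a' := a + 1
          if a' = 256 then (0, 0, 0, 0) else (a', 0, 0, 0)
        else (a, b', 0, 0)
      else (a, b, c', 0)
    else (a, b, c, d')
  let key := "F4939FEFC47E:" ++ PySem.Int.toStr o.1 ++ "." ++ PySem.Int.toStr o.2.1 ++ "."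
      ++ PySem.Int.toStr o.2.2.1 ++ "." ++ PySem.Int.toStr o.2.2.2 ++ "/32"
  let data : List (String × String) :=
    [("action_type", "vnet"), ("vnet", "Vnet" ++ PySem.Str.zfill (PySem.Int.toStr i) 7)]
  (ret.insert key data, o)

def generate_route_alt (num : Int) : List (String × List (String × String)) :=
  ((PySem.List.pyRange 0 num 1).foldl stepB (PySem.Dict.empty, 10, 0, 50, 1)).1.items

-- ===== PRECONDITION & SPEC =====
def Spec_generate_route (num : Int) (out : List (String × List (String × String))) : Prop := out = generate_route_alt num
instance (num : Int) (out : List (String × List (String × String))) : Decidable (Spec_generate_route num out) := by unfold Spec_generate_route; infer_instance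

-- ===== CLAIM (what is proved, stated in full; the proofs are below) =====
def Claim_equal_generate_route : Prop := ∀ (num : Int), Dom_generate_route num → Spec_generate_route num (generate_route num)

-- ===== LEMMAS AND PROOFS =====

-- invariant: B's octets are the base-256 digits of A's pos, taken mod 2^32
def OctInv (pos a b c d : Int) : Prop :=
  0 ≤ pos ∧ 0 ≤ a ∧ a < 256 ∧ 0 ≤ b ∧ b < 256 ∧ 0 ≤ c ∧ c < 256 ∧ 0 ≤ d ∧ d < 256 ∧
    ((a * 256 + b) * 256 + c) * 256 + d = pos % 4294967296

theorem int2ip_eq (n : Int) :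
    int2ip n = PySem.Int.toStr ((((n.fdiv 256).fdiv 256).fdiv 256).fmod 256)
      ++ "." ++ PySem.Int.toStr (((n.fdiv 256).fdiv 256).fmod 256)
      ++ "." ++ PySem.Int.toStr ((n.fdiv 256).fmod 256)
      ++ "." ++ PySem.Int.toStr (n.fmod 256) := by
  have h4 : PySem.List.pyRange 0 4 1 = [0,1,2,3] := by decide
  simp [int2ip, h4, PySem.Int.divmod?, PySem.List.insert, PySem.List.sliceIndices,
    PySem.Str.join, PySem.Chars.join, PySem.Int.toStr, List.intercalate, List.intersperse]
  apply String.toList_inj.mp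
  simp

theorem key_chars_congr (x1 x2 x3 x4 y1 y2 y3 y4 : Int)
    (h1 : x1 = y1) (h2 : x2 = y2) (h3 : x3 = y3) (h4 : x4 = y4) :
    PySem.Int.toChars x1 ++ '.' :: (PySem.Int.toChars x2 ++ '.' :: (PySem.Int.toChars x3 ++
      '.' :: (PySem.Int.toChars x4 ++ ['/', '3', '2']))) =
    PySem.Int.toChars y1 ++ '.' :: (PySem.Int.toChars y2 ++ '.' :: (PySem.Int.toChars y3 ++
      '.' :: (PySem.Int.toChars y4 ++ ['/', '3', '2']))) := by
  subst h1 h2 h3 h4; rfl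

theorem step_eq (ret : PySem.Dict String (List (String × String))) (pos a b c d i : Int)
    (h : OctInv pos a b c d) :
    stepA (ret, pos) i = ((stepB (ret, a, b, c, d) i).1, pos + 1) ∧
      OctInv (pos + 1) (stepB (ret, a, b, c, d) i).2.1 (stepB (ret, a, b, c, d) i).2.2.1
        (stepB (ret, a, b, c, d) i).2.2.2.1 (stepB (ret, a, b, c, d) i).2.2.2.2 := by
  obtain ⟨hp, ha0, ha1, hb0, hb1, hc0, hc1, hd0, hd1, hv⟩ := h
  simp only [stepA, stepB, int2ip_eq, OctInv]
  simp only [Int.fmod_eq_emod, Int.fdiv_eq_ediv]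
  norm_num
  split_ifs with h1 h2 h3 h4
  all_goals refine ⟨?_, by dsimp only; omega⟩
  all_goals apply congrArg (fun k => PySem.Dict.insert ret k _)
  all_goals apply String.toList_inj.mp
  all_goals simp
  all_goals exact key_chars_congr _ _ _ _ _ _ _ _ (by omega) (by omega) (by omega) (by omega)

theorem fold_eq (L : List Int) (ret : PySem.Dict String (List (String × String)))
    (pos a b c d : Int) (h : OctInv pos a b c d) :
    (L.foldl stepA (ret, pos)).1 = (L.foldl stepB (ret, a, b, c, d)).1 := by
  induction L generalizing ret pos a b c d with
  | nil => rfl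
  | cons x xs ih =>
    obtain ⟨h1, h2⟩ := step_eq ret pos a b c d x h
    simp only [List.foldl_cons, h1]
    exact ih _ _ _ _ _ _ h2

theorem ip2int_lit : ip2int "10.0.50.1" = 167784961 := by decide

-- ===== VERDICT (by name: the statement is the Claim_ definition above) =====
theorem generate_route_spec : Claim_equal_generate_route := by
  intro num _
  unfold Spec_generate_route generate_route generate_route_alt
  simp only [ip2int_lit]
  exact congrArg PySem.Dict.items (fold_eq _ _ _ 10 0 50 1 (by unfold OctInv; decide))
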